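-- pv_equiv track=rewrite | github.com/afalaize/lasie | test/FSI/fenics_simulation/ellipse_fnchar.py | replace_pos_symbs_by_coord_vec_elements
-- ===== SOURCE A (Python) =====
-- def replace_pos_symbs_by_coord_vec_elements(ccode, symb='x', dim=2):
--     """
--     Replace occurences of "xi" with "x[i]" for i in range(dim) and the symbol
--     "x" specified by symb.
--
--     Parameters
--     ----------
--
--     ccode: str
--         String associated with a piece of C code.
--
--     symb: str
--         String to search for in ccode. E.g. with symb='toto', occurences of
--         'totoi' with i an integer are replaced with 'toto[i]'.
--
--     dim: int
--         The number of components of vector represented by 'symb'.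
--
--     Example
--     -------
--
--     >>> ccode = 'pow(pow(x0, 2)+pow(x1, 2), 0.5)'
--     >>> replace_pos_symbs_by_coord_vec_elements(ccode, symb='x', dim=2)
--     'pow(pow(x[0], 2)+pow(x[0], 2), 0.5)'
--     """
--     if isinstance(ccode, list):
--         for i, e in enumerate(ccode):
--             ccode[i] = replace_pos_symbs_by_coord_vec_elements(e,
--                                                                symb=symb,
--                                                                dim=dim)
--     elif isinstance(ccode, str):
--         for i in range(dim):
--             old = symb+str(i)
--             new = 'x[{0}]'.format(i)
--             ccode = ccode.replace(old, new)
--     else: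
--         raise TypeError('Unknown type for ccode.')
--     return ccode
-- ===== SOURCE B (Python) =====
-- def _has_positional_token(s, symb):
--     # one scan: is there any occurrence of symb immediately followed by a digit?
--     p = s.find(symb)
--     while p != -1:
--         q = p + len(symb)
--         if q < len(s) and s[q].isdigit():
--             return True
--         p = s.find(symb, p + 1)
--     return False
--
--
-- def _subst(s, symb, dim):
--     for i in range(dim):
--         if not _has_positional_token(s, symb):
--             break  # no symb+digit anywhere: every remaining pass is a no-op
--         s = 'x[{0}]'.format(i).join(s.split(symb + str(i)))
--     return s
--
--
-- def replace_pos_symbs_by_coord_vec_elements(ccode, symb='x', dim=2):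
--     if isinstance(ccode, list):
--         # iterative worklist over nested lists, mutating each list in place
--         stack = [ccode]
--         while stack:
--             cur = stack.pop()
--             for i, e in enumerate(cur):
--                 if isinstance(e, list):
--                     stack.append(e)
--                 elif isinstance(e, str):
--                     cur[i] = _subst(e, symb, dim)
--                 else:
--                     raise TypeError('Unknown type for ccode.')
--         return ccode
--     elif isinstance(ccode, str):
--         return _subst(ccode, symb, dim)
--     else:
--         raise TypeError('Unknown type for ccode.')
-- ===== Notes on version B (the rewrite author's own statement) =====
-- stated objective: faster
-- what changed: B short-circuits the pass loop: one find-based scan decides whether symb followed by any digit occurs at all and breaks out as soon as it does not (so only passes that can match are paid for), and each remaining pass is done by split-on-pattern/join instead of str.replace; nested lists are handled with an iterative worklist instead of recursion.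
import Mathlib
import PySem

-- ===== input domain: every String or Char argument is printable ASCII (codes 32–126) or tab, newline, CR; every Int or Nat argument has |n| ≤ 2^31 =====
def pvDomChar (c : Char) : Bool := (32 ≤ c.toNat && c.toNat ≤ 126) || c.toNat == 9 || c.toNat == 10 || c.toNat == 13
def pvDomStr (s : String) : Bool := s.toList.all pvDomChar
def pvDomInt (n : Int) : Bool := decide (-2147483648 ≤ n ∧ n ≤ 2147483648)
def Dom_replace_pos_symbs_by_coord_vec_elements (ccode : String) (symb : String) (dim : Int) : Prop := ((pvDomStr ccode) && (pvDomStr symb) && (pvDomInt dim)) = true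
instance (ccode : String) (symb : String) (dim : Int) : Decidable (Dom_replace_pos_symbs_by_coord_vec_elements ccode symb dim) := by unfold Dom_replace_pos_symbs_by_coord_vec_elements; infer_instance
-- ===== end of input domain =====

-- B breaks out of the pass loop as soon as no occurrence of symb followed by a digit remains
-- (one find-based scan) and does each remaining pass by split/join; return values only — on
-- Python lists A mutates in place, which B also does.

-- ===== PORT A =====
-- for i in range(dim): ccode = ccode.replace(symb + str(i), 'x[{0}]'.format(i))
def replace_pos_symbs_by_coord_vec_elements (ccode : String) (symb : String) (dim : Int) : String :=
  String.ofList ((PySem.List.pyRange 0 dim 1).foldl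
    (fun s i => PySem.Chars.replace s (symb.toList ++ PySem.Int.toChars i)
      ('x' :: '[' :: (PySem.Int.toChars i ++ [']']))) ccode.toList)

-- ===== PORT B =====
-- bound on s.find(sub, k): needed only for the termination of pvHasTokGo below
theorem pvFindFromNat_bounds (s sub : List Char) (k : Nat)
    (h : PySem.Chars.findFrom s sub (k : Int) none ≠ -1) :
    (k : Int) ≤ PySem.Chars.findFrom s sub (k : Int) none ∧
      PySem.Chars.findFrom s sub (k : Int) none ≤ s.length := by
  by_cases hk : k ≤ s.length
  · obtain ⟨h1, _, _⟩ := PySem.Chars.findFrom_natCast_spec s sub k hk h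
    rw [PySem.Chars.findFrom_natCast s sub k hk] at *
    split at h
    · exact absurd rfl h
    · constructor
      · have := PySem.Chars.neg_one_le_find (s.drop k) sub
        rename_i hr; omega
      · have := PySem.Chars.find_le_length (s.drop k) sub
        rename_i hr
        simp only [List.length_drop] at this
        omega
  · exfalso
    apply h
    simp only [PySem.Chars.findFrom]
    have : ¬ ((k : Int)) < 0 := by omega
    simp only [this, if_false]
    rw [if_pos (by omega)]

-- p = s.find(symb, k); while p != -1: if p+len(symb) in range and s[p+len(symb)].isdigit(): True;
-- p = s.find(symb, p+1)  — the loop of _has_positional_token, as a recursion on the start index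
def pvHasTokGo (s symb : List Char) (k : Nat) : Bool :=
  if _hp : PySem.Chars.findFrom s symb (k : Int) none = -1 then false
  else
    if (match PySem.List.pyGet? s (((PySem.Chars.findFrom s symb (k : Int) none).toNat + symb.length : Nat) : Int) with
        | some c => PySem.Chars.strIsdigit [c]
        | none => false) then true
    else pvHasTokGo s symb ((PySem.Chars.findFrom s symb (k : Int) none).toNat + 1)
termination_by s.length + 1 - k
decreasing_by
  have := pvFindFromNat_bounds s symb k _hp
  omega

-- for i in range(dim): if not _has_positional_token(s, symb): break; s = 'x[{0}]'.format(i).join(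
-- s.split(symb + str(i)))  — the for/break loop as a recursion over the range list.
-- `.split(sep)` is PySem.Chars.splitOn (the sep ≠ "" form, exact here: symb+str(i) is never empty);
-- `.find` starts the scan at index 0, i.e. pvHasTokGo … 0.
def pvBloop (symb : List Char) (L : List Int) (s : List Char) : List Char :=
  match L with
  | [] => s
  | i :: rest =>
    if pvHasTokGo s symb 0 then
      pvBloop symb rest
        (PySem.Chars.join ('x' :: '[' :: (PySem.Int.toChars i ++ [']']))
          (PySem.Chars.splitOn s (symb ++ PySem.Int.toChars i)))
    else s

def replace_pos_symbs_by_coord_vec_elements_alt (ccode : String) (symb : String) (dim : Int) : String :=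
  String.ofList (pvBloop symb.toList (PySem.List.pyRange 0 dim 1) ccode.toList)

-- ===== PRECONDITION & SPEC =====
def Spec_replace_pos_symbs_by_coord_vec_elements (ccode : String) (symb : String) (dim : Int) (out : String) : Prop := out = replace_pos_symbs_by_coord_vec_elements_alt ccode symb dim
instance (ccode : String) (symb : String) (dim : Int) (out : String) : Decidable (Spec_replace_pos_symbs_by_coord_vec_elements ccode symb dim out) := by unfold Spec_replace_pos_symbs_by_coord_vec_elements; infer_instance

-- ===== CLAIM (what is proved, stated in full; the proofs are below) =====
def Claim_equal_replace_pos_symbs_by_coord_vec_elements : Prop := ∀ (ccode : String) (symb : String) (dim : Int), Dom_replace_pos_symbs_by_coord_vec_elements ccode symb dim → Spec_replace_pos_symbs_by_coord_vec_elements ccode symb dim (replace_pos_symbs_by_coord_vec_elements ccode symb dim)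

-- ===== LEMMAS AND PROOFS =====

-- reference recursions for one replace pass
def pvRepSpec (sep new : List Char) : List Char → List Char
  | [] => []
  | c :: t =>
    if sep.isPrefixOf (c :: t) then new ++ pvRepSpec sep new (t.drop (sep.length - 1))
    else c :: pvRepSpec sep new t
termination_by l => l.length
decreasing_by
  · simp only [List.length_cons]
    exact Nat.lt_succ_of_le (List.length_drop (l := t) (i := sep.length - 1) ▸ Nat.sub_le _ _)
  · simp

def pvSplitSpec (sep : List Char) : List Char → List (List Char)
  | [] => [[]]
  | c :: t =>
    if sep.isPrefixOf (c :: t) then [] :: pvSplitSpec sep (t.drop (sep.length - 1))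
    else (pvSplitSpec sep t).modifyHead (c :: ·)
termination_by l => l.length
decreasing_by
  · simp only [List.length_cons]
    exact Nat.lt_succ_of_le (List.length_drop (l := t) (i := sep.length - 1) ▸ Nat.sub_le _ _)
  · simp

theorem pvSplitSpec_ne_nil (sep l : List Char) : pvSplitSpec sep l ≠ [] := by
  induction l using pvSplitSpec.induct sep with
  | case1 => simp [pvSplitSpec]
  | case2 c t h _ => simp [pvSplitSpec, h]
  | case3 c t h ih =>
    simp only [pvSplitSpec, if_neg h]
    cases hS : pvSplitSpec sep t with
    | nil => exact absurd hS ih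
    | cons a as => simp

theorem pvJoin_modifyHead (new pre : List Char) (parts : List (List Char)) (h : parts ≠ []) :
    PySem.Chars.join new (parts.modifyHead (pre ++ ·)) = pre ++ PySem.Chars.join new parts := by
  cases parts with
  | nil => exact absurd rfl h
  | cons a as =>
    cases as with
    | nil => simp [PySem.Chars.join_singleton]
    | cons b bs => simp [PySem.Chars.join_cons_cons]

theorem pvJoin_splitSpec (sep new l : List Char) :
    PySem.Chars.join new (pvSplitSpec sep l) = pvRepSpec sep new l := by
  induction l using pvSplitSpec.induct sep with
  | case1 => simp [pvSplitSpec, pvRepSpec, PySem.Chars.join_singleton]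
  | case2 c t h ih =>
    simp only [pvSplitSpec, pvRepSpec, if_pos h]
    obtain ⟨a, as, hS⟩ := List.exists_cons_of_ne_nil (pvSplitSpec_ne_nil sep (t.drop (sep.length - 1)))
    rw [hS, PySem.Chars.join_cons_cons, ← hS, ih]
    simp
  | case3 c t h ih =>
    simp only [pvSplitSpec, pvRepSpec, if_neg h]
    have := pvJoin_modifyHead new [c] (pvSplitSpec sep t) (pvSplitSpec_ne_nil sep t)
    simpa [ih] using this

theorem pvRep_go (sep new : List Char) (hs : sep ≠ []) :
    ∀ fuel (l acc : List Char), l.length ≤ fuel →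
      PySem.Chars.replace.go sep new fuel l acc = acc.reverse ++ pvRepSpec sep new l := by
  intro fuel
  induction fuel with
  | zero =>
    intro l acc hl
    have : l = [] := List.length_eq_zero_iff.mp (Nat.le_zero.mp hl)
    subst this
    simp [PySem.Chars.replace.go, pvRepSpec]
  | succ fuel ih =>
    intro l acc hl
    cases l with
    | nil => simp [PySem.Chars.replace.go, pvRepSpec]
    | cons c t =>
      by_cases hp : sep.isPrefixOf (c :: t)
      · obtain ⟨n, hn⟩ := Nat.exists_eq_succ_of_ne_zero (by simpa using hs : sep.length ≠ 0)
        have hdrop : (c :: t).drop sep.length = t.drop (sep.length - 1) := by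
          rw [hn]; simp
        have hlen : (t.drop (sep.length - 1)).length ≤ fuel := by
          have := List.length_drop (l := t) (i := sep.length - 1)
          simp at hl; omega
        simp only [PySem.Chars.replace.go, if_pos hp, hdrop, pvRepSpec, ih _ _ hlen]
        simp
      · have hlen : t.length ≤ fuel := by simp at hl; omega
        simp only [PySem.Chars.replace.go, if_neg hp, pvRepSpec, ih _ _ hlen]
        simp

theorem pvSplit_go (sep : List Char) (hs : sep ≠ []) :
    ∀ fuel (l cur : List Char) (acc : List (List Char)), l.length ≤ fuel →
      PySem.Chars.splitOn.go sep fuel l cur acc =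
        acc.reverse ++ (pvSplitSpec sep l).modifyHead (cur.reverse ++ ·) := by
  intro fuel
  induction fuel with
  | zero =>
    intro l cur acc hl
    have : l = [] := List.length_eq_zero_iff.mp (Nat.le_zero.mp hl)
    subst this
    simp [PySem.Chars.splitOn.go, pvSplitSpec]
  | succ fuel ih =>
    intro l cur acc hl
    cases l with
    | nil => simp [PySem.Chars.splitOn.go, pvSplitSpec]
    | cons c t =>
      by_cases hp : sep.isPrefixOf (c :: t)
      · obtain ⟨n, hn⟩ := Nat.exists_eq_succ_of_ne_zero (by simpa using hs : sep.length ≠ 0)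
        have hdrop : (c :: t).drop sep.length = t.drop (sep.length - 1) := by
          rw [hn]; simp
        have hlen : (t.drop (sep.length - 1)).length ≤ fuel := by
          have := List.length_drop (l := t) (i := sep.length - 1)
          simp at hl; omega
        simp only [PySem.Chars.splitOn.go, if_pos hp, hdrop, ih _ _ _ hlen, pvSplitSpec]
        simp only [List.reverse_cons, List.reverse_nil, List.nil_append]
        rw [show (fun x : List Char => x) = id from rfl, List.modifyHead_id, id_eq]
        simp
      · have hlen : t.length ≤ fuel := by simp at hl; omega
        simp only [PySem.Chars.splitOn.go, if_neg hp, ih _ _ _ hlen, pvSplitSpec]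
        cases hS : pvSplitSpec sep t with
        | nil => exact absurd hS (pvSplitSpec_ne_nil sep t)
        | cons a as => simp

theorem pvReplace_eq (sep new l : List Char) (hs : sep ≠ []) :
    PySem.Chars.replace l sep new = pvRepSpec sep new l := by
  simp only [PySem.Chars.replace, List.isEmpty_eq_false_iff.mpr hs]
  simpa using pvRep_go sep new hs l.length l [] (le_refl _)

theorem pvJoin_splitOn_eq_replace (sep new l : List Char) (hs : sep ≠ []) :
    PySem.Chars.join new (PySem.Chars.splitOn l sep) = PySem.Chars.replace l sep new := by
  rw [PySem.Chars.splitOn, pvSplit_go sep hs _ l [] [] (by omega)]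
  simp only [List.reverse_nil, List.nil_append]
  rw [show (fun x : List Char => x) = id from rfl, List.modifyHead_id, id_eq]
  rw [pvJoin_splitSpec sep new l, pvReplace_eq sep new l hs]

theorem pvRepSpec_no (sep new l : List Char) (h : ¬ sep <:+: l) : pvRepSpec sep new l = l := by
  induction l using pvSplitSpec.induct sep with
  | case1 => simp [pvRepSpec]
  | case2 c t hp ih =>
    exact absurd ((List.isPrefixOf_iff_prefix.mp hp).isInfix) h
  | case3 c t hp ih =>
    have ht : ¬ sep <:+: t := fun hi => h (List.infix_cons hi)
    simp only [pvRepSpec, if_neg hp]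
    simp [ih ht]

-- head digit of a decimal numeral
theorem pvToDigitsCore_head :
    ∀ fuel n (ds : List Char), n < fuel →
      ∃ m r, m < 10 ∧ Nat.toDigitsCore 10 fuel n ds = Nat.digitChar m :: (r ++ ds) ∧
        (n < 10 → m = n ∧ r = []) := by
  intro fuel
  induction fuel with
  | zero => intro n ds hn; omega
  | succ fuel ih =>
    intro n ds hn
    by_cases h0 : n / 10 = 0
    · refine ⟨n % 10, [], Nat.mod_lt _ (by omega), ?_, ?_⟩
      · simp [Nat.toDigitsCore, h0]
      · intro h10; simp [Nat.mod_eq_of_lt h10]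
    · have h10 : 10 ≤ n := by
        by_contra hlt
        exact h0 (Nat.div_eq_of_lt (by omega))
      have hlt : n / 10 < fuel := by
        have := Nat.div_lt_self (by omega : 0 < n) (by omega : 1 < 10)
        omega
      obtain ⟨m, r, hm, heq, _⟩ := ih (n / 10) ((n % 10).digitChar :: ds) hlt
      refine ⟨m, r ++ [(n % 10).digitChar], hm, ?_, by omega⟩
      simp only [Nat.toDigitsCore, if_neg h0]
      rw [heq]; simp

theorem pvToChars_head (i : Int) (h0 : 0 ≤ i) :
    ∃ m r, m < 10 ∧ PySem.Int.toChars i = Nat.digitChar m :: r := by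
  have hnn : ¬ i < 0 := by omega
  obtain ⟨m, r, hm, heq, _⟩ :=
    pvToDigitsCore_head (i.toNat + 1) i.toNat [] (Nat.lt_succ_self _)
  refine ⟨m, r, hm, ?_⟩
  simp only [PySem.Int.toChars, if_neg hnn, Nat.toDigits]
  simpa using heq

theorem pvToChars_ne_nil (i : Int) (h0 : 0 ≤ i) : PySem.Int.toChars i ≠ [] := by
  obtain ⟨m, r, _, heq⟩ := pvToChars_head i h0
  simp [heq]

theorem pvDigitChar_isdigit (m : Nat) (hm : m < 10) :
    PySem.Chars.strIsdigit [Nat.digitChar m] = true := by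
  interval_cases m <;> decide

-- "there is an occurrence of symb at j followed by a digit"
def pvTokAt (s symb : List Char) (j : Nat) : Prop :=
  symb <+: s.drop j ∧
    ∃ c w, s.drop (j + symb.length) = c :: w ∧ PySem.Chars.strIsdigit [c] = true

theorem pvHasTokGo_false (s symb : List Char) (k : Nat)
    (hfalse : pvHasTokGo s symb k = false) : ∀ j, k ≤ j → ¬ pvTokAt s symb j := by
  intro j hkj htok
  rw [pvHasTokGo] at hfalse
  by_cases hp : PySem.Chars.findFrom s symb (k : Int) none = -1
  · -- find returned -1: no occurrence of symb at or after k
    by_cases hk : k ≤ s.length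
    · have hno : ¬ symb <:+: s.drop k :=
        (PySem.Chars.findFrom_natCast_eq_neg_one_iff s symb k hk).mp hp
      apply hno
      have hdj : s.drop j = (s.drop k).drop (j - k) := by
        rw [List.drop_drop]; congr 1; omega
      exact (htok.1.isInfix).trans (by rw [hdj]; exact (List.drop_suffix _ _).isInfix)
    · -- k is past the end: s.drop (j + |symb|) = [], so no digit can follow
      obtain ⟨c, w, hcw, _⟩ := htok.2
      have h1 : s.length ≤ j + symb.length := by omega
      have : s.drop (j + symb.length) = [] := List.drop_eq_nil_of_le h1
      rw [this] at hcw
      exact absurd hcw (by simp)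
  · rw [dif_neg hp] at hfalse
    have hklen : k ≤ s.length := by
      have := pvFindFromNat_bounds s symb k hp
      omega
    obtain ⟨hle, hpre, hmin⟩ := PySem.Chars.findFrom_natCast_spec s symb k hklen hp
    by_cases hdig : (match PySem.List.pyGet? s
        (((PySem.Chars.findFrom s symb (k : Int) none).toNat + symb.length : Nat) : Int) with
        | some c => PySem.Chars.strIsdigit [c]
        | none => false) = true
    · rw [if_pos hdig] at hfalse
      exact absurd hfalse (by simp)
    · rw [if_neg hdig] at hfalse
      rcases Nat.lt_or_ge j ((PySem.Chars.findFrom s symb (k : Int) none).toNat + 1) with hj | hj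
      · rcases Nat.lt_or_ge j (PySem.Chars.findFrom s symb (k : Int) none).toNat with hj' | hj'
        · exact hmin j hkj hj' htok.1
        · -- j is exactly the found position: the digit test there failed
          have hjp : j = (PySem.Chars.findFrom s symb (k : Int) none).toNat := by omega
          obtain ⟨c, w, hcw, hc⟩ := htok.2
          apply hdig
          have hg : PySem.List.pyGet? s (((PySem.Chars.findFrom s symb (k : Int) none).toNat +
              symb.length : Nat) : Int) = some c := by
            rw [PySem.List.pyGet?_natCast, ← hjp]
            rw [← List.head?_drop, hcw]
            rfl
          rw [hg]
          exact hc
      · exact pvHasTokGo_false s symb ((PySem.Chars.findFrom s symb (k : Int) none).toNat + 1)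
          hfalse j hj htok
termination_by s.length + 1 - k
decreasing_by
  have := pvFindFromNat_bounds s symb k hp
  omega

-- no pass can match when no symb+digit occurs
theorem pvNoTok_no_pattern (s symb : List Char) (h : pvHasTokGo s symb 0 = false)
    (v : Int) (hv : 0 ≤ v) : ¬ (symb ++ PySem.Int.toChars v) <:+: s := by
  intro hinf
  obtain ⟨m, r, hm, heq⟩ := pvToChars_head v hv
  have hisin : PySem.Chars.isIn (symb ++ PySem.Int.toChars v) s = true :=
    (PySem.Chars.isIn_iff_infix _ _).mpr hinf
  obtain ⟨j, hj⟩ := (PySem.Chars.exists_prefix_drop_iff_isIn _ _).mpr hisin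
  obtain ⟨u, hu⟩ := hj
  apply pvHasTokGo_false s symb 0 h j (Nat.zero_le j)
  constructor
  · exact ⟨PySem.Int.toChars v ++ u, by rw [← hu, List.append_assoc]⟩
  · refine ⟨Nat.digitChar m, r ++ u, ?_, pvDigitChar_isdigit m hm⟩
    have : s.drop (j + symb.length) = (s.drop j).drop symb.length := by
      rw [List.drop_drop, Nat.add_comm]
    rw [this, ← hu, heq]
    simp

theorem pvFoldl_fixed {α β : Type} (f : α → β → α) (s : α) :
    ∀ l : List β, (∀ i ∈ l, f s i = s) → l.foldl f s = s := by
  intro l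
  induction l with
  | nil => intro _; rfl
  | cons a as ih =>
    intro h
    rw [List.foldl_cons, h a (by simp)]
    exact ih (fun i hi => h i (by simp [hi]))

theorem pvBloop_eq_foldl (symb : List Char) :
    ∀ (L : List Int) (s : List Char), (∀ i ∈ L, 0 ≤ i) →
      pvBloop symb L s = L.foldl
        (fun s i => PySem.Chars.replace s (symb ++ PySem.Int.toChars i)
          ('x' :: '[' :: (PySem.Int.toChars i ++ [']']))) s := by
  intro L
  induction L with
  | nil => intro s _; rfl
  | cons i rest ih =>
    intro s hpos
    have hi : 0 ≤ i := hpos i (by simp)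
    have hsep : symb ++ PySem.Int.toChars i ≠ [] := by
      simp [pvToChars_ne_nil i hi]
    by_cases htok : pvHasTokGo s symb 0
    · rw [pvBloop, if_pos htok, ih _ (fun j hj => hpos j (by simp [hj])), List.foldl_cons,
        pvJoin_splitOn_eq_replace _ _ _ hsep]
    · rw [pvBloop, if_neg htok]
      refine (pvFoldl_fixed _ _ _ ?_).symm
      intro v hv
      have hv0 : 0 ≤ v := hpos v hv
      have hvsep : symb ++ PySem.Int.toChars v ≠ [] := by
        simp [pvToChars_ne_nil v hv0]
      rw [pvReplace_eq _ _ _ hvsep]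
      exact pvRepSpec_no _ _ _ (pvNoTok_no_pattern s symb (by simpa using htok) v hv0)

-- ===== VERDICT (by name: the statement is the Claim_ definition above) =====
theorem replace_pos_symbs_by_coord_vec_elements_spec : Claim_equal_replace_pos_symbs_by_coord_vec_elements := by
  unfold Claim_equal_replace_pos_symbs_by_coord_vec_elements
  intro ccode symb dim _
  unfold Spec_replace_pos_symbs_by_coord_vec_elements
  unfold replace_pos_symbs_by_coord_vec_elements replace_pos_symbs_by_coord_vec_elements_alt
  rw [pvBloop_eq_foldl symb.toList (PySem.List.pyRange 0 dim 1) ccode.toList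
    (fun i hi => (PySem.List.mem_pyRange_one.mp hi).1)]
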